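-- pv_equiv track=rewrite | github.com/Glasspham/Summary_exercises | Bai_131/main.py | ktl
-- ===== SOURCE A (Python) =====
-- def ktl(n, k, t):
--     n = str(n)
--     t = 0
--     for i in range(len(n)):
--         if n[i] == "5":
--             t += 1
--         if t == k + 1:
--             return n[:i] + "6" + "0" * (len(n) - i - 1)
-- ===== SOURCE B (Python) =====
-- def ktl(n, k, t):
--     # Split-based reformulation: chop str(n) at the first k+1 fives with
--     # str.split and reconstruct the answer from the length of the tail piece.
--     # For k < 0 (no "0th five" exists) B returns None; A can still return a
--     # modified string for k = -1 (see D_ in the Lean file).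
--     s = str(n)
--     if k < 0:
--         return None
--     parts = s.split("5", k + 1)
--     if len(parts) == k + 2:
--         last = parts[-1]
--         i = len(s) - len(last) - 1
--         return s[:i] + "6" + "0" * len(last)
-- ===== Notes on version B (the rewrite author's own statement) =====
-- stated objective: alternative
-- what changed: B replaces A's per-digit counter loop with early return by a single str.split('5', k+1) call, deciding success from the number of pieces and reconstructing the answer arithmetically from the length of the last piece.
-- intended difference: For k = -1 when str(n) does not start with '5', A's check 't == k+1' fires before any five is seen and A returns str(n) with its first character replaced by '6' and the rest zeroed, while B returns None; None is the intended value since there is no 0th occurrence of '5' to modify. — e.g. on ktl(1, -1, 0): A returns some "6", B returns none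
import Mathlib
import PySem

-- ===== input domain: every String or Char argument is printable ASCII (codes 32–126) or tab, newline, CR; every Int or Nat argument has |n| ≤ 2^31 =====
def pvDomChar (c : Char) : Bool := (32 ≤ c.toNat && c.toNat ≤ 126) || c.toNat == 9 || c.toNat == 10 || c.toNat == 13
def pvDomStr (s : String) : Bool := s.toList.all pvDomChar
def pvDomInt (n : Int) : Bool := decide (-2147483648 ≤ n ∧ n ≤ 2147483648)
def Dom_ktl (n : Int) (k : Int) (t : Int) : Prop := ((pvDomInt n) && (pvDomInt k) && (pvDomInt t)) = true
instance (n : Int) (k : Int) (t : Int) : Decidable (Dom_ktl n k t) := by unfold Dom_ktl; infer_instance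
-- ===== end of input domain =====

-- B replaces the counting scan by one str.split('5', k+1) call plus length arithmetic on the last piece.
-- ===== PORT A =====
-- A's for-i-in-range loop with counter t and early return, as index recursion.
def ktlLoopA (s : List Char) (k : Int) (i : Nat) (t : Int) : Option String :=
  if h : i < s.length then
    let t' := if s[i] = '5' then t + 1 else t
    if t' = k + 1 then
      some (String.mk (s.take i ++ '6' :: List.replicate (s.length - i - 1) '0'))
    else ktlLoopA s k (i + 1) t'
  else none
termination_by s.length - i

def ktl (n : Int) (k : Int) (t : Int) : Option String :=
  -- n = str(n); t = 0 (the parameter t is dead in A)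
  ktlLoopA (PySem.Int.toStr n).toList k 0 0

-- ===== PORT B =====
def ktl_alt (n : Int) (k : Int) (t : Int) : Option String :=
  let s := (PySem.Int.toStr n).toList
  if k < 0 then none
  else
    -- parts = s.split("5", k + 1)  (sep nonempty, so Chars.splitOnMax is exact)
    let parts := PySem.Chars.splitOnMax s ['5'] (k + 1)
    if (parts.length : Int) = k + 2 then
      match PySem.List.pyGet? parts (-1) with   -- last = parts[-1]
      | some last =>
          let i : Int := (s.length : Int) - (last.length : Int) - 1
          some (String.mk (PySem.List.slice s none (some i) ++ '6' :: List.replicate last.length '0'))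
      | none => none
    else none

-- ===== PRECONDITION & SPEC =====
-- For k = -1 when str(n) does not start with '5', A returns str(n) with its first character
-- replaced by '6' and the rest zeroed (the t == k+1 check fires before any '5' is seen);
-- B returns none, the intended value, since there is no 0th occurrence of '5' to modify.
def D_ktl (n : Int) (k : Int) (t : Int) : Prop :=
  k = -1 ∧ PySem.Str.startswith (PySem.Int.toStr n) "5" = false
instance (n : Int) (k : Int) (t : Int) : Decidable (D_ktl n k t) := by unfold D_ktl; infer_instance
def Spec_ktl (n : Int) (k : Int) (t : Int) (out : Option String) : Prop :=
  ¬ D_ktl n k t → out = ktl_alt n k t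
instance (n : Int) (k : Int) (t : Int) (out : Option String) : Decidable (Spec_ktl n k t out) := by unfold Spec_ktl; infer_instance
def pvDiffWitness_ktl : Int × Int × Int := (1, -1, 0)
def pvDiffWitnessOut_ktl : (Option String) × (Option String) := (some "6", none)

-- ===== CLAIM (what is proved, stated in full; the proofs are below) =====
def Claim_unchanged_ktl : Prop := ∀ (n : Int) (k : Int) (t : Int), Dom_ktl n k t → Spec_ktl n k t (ktl n k t)
def Claim_changed_ktl : Prop := Dom_ktl (pvDiffWitness_ktl.1) (pvDiffWitness_ktl.2.1) (pvDiffWitness_ktl.2.2) ∧ D_ktl (pvDiffWitness_ktl.1) (pvDiffWitness_ktl.2.1) (pvDiffWitness_ktl.2.2) ∧ ktl (pvDiffWitness_ktl.1) (pvDiffWitness_ktl.2.1) (pvDiffWitness_ktl.2.2) = pvDiffWitnessOut_ktl.1 ∧ ktl_alt (pvDiffWitness_ktl.1) (pvDiffWitness_ktl.2.1) (pvDiffWitness_ktl.2.2) = pvDiffWitnessOut_ktl.2 ∧ pvDiffWitnessOut_ktl.1 ≠ pvDiffWitnessOut_ktl.2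
def Claim_exact_ktl : Prop := ∀ (n : Int) (k : Int) (t : Int), Dom_ktl n k t → D_ktl n k t → ktl n k t ≠ ktl_alt n k t

-- ===== LEMMAS AND PROOFS =====

-- Index of the (m+1)-th '5' in l (Nat index), if it exists.
def idx5n : List Char → Nat → Option Nat
  | [], _ => none
  | c :: rest, 0 => if c = '5' then some 0 else (idx5n rest 0).map Nat.succ
  | c :: rest, m + 1 =>
      if c = '5' then (idx5n rest m).map Nat.succ else (idx5n rest (m + 1)).map Nat.succ

-- Clean model of Python's s.split('5', m) (single-character separator).
def spl (m : Nat) (l : List Char) : List (List Char) :=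
  match m, l with
  | _, [] => [[]]
  | 0, l => [l]
  | m + 1, c :: rest => if c = '5' then [] :: spl m rest else (spl (m + 1) rest).modifyHead (List.cons c)

lemma spl_zero (l : List Char) : spl 0 l = [l] := by
  cases l <;> rfl

lemma spl_ne_nil (m : Nat) (l : List Char) : spl m l ≠ [] := by
  induction l generalizing m with
  | nil => simp [spl]
  | cons c rest ih =>
    cases m with
    | zero => simp [spl]
    | succ m =>
      simp only [spl]
      split
      · simp
      · cases h : spl (m + 1) rest with
        | nil => exact absurd h (ih (m + 1))
        | cons a b => simp [List.modifyHead]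

-- splitOnMax.go with sep = ['5'] computes spl (fuel large enough).
lemma go_eq_spl (l : List Char) : ∀ (fuel m : Nat) (cur : List Char) (acc : List (List Char)),
    l.length < fuel →
    PySem.Chars.splitOnMax.go ['5'] fuel m l cur acc
      = acc.reverse ++ (spl m l).modifyHead (cur.reverse ++ ·) := by
  induction l with
  | nil =>
    intro fuel m cur acc hf
    cases fuel with
    | zero => omega
    | succ f => simp [PySem.Chars.splitOnMax.go, spl, List.modifyHead]
  | cons c rest ih =>
    intro fuel m cur acc hf
    cases fuel with
    | zero => omega
    | succ f =>
      cases m with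
      | zero => simp [PySem.Chars.splitOnMax.go, spl_zero, List.modifyHead]
      | succ m =>
        simp only [List.length_cons] at hf
        by_cases h5 : c = '5'
        · have hpre : (['5'].isPrefixOf (c :: rest)) = true := by simp [h5, List.isPrefixOf]
          rw [PySem.Chars.splitOnMax.go]
          simp only [Nat.succ_ne_zero, hpre, if_true, reduceIte]
          rw [show m + 1 - 1 = m from rfl, show List.drop (['5'].length) (c :: rest) = rest from rfl]
          rw [ih f m [] (cur.reverse :: acc) (by omega)]
          simp only [spl, h5, reduceIte, List.reverse_cons, List.reverse_nil, List.nil_append]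
          cases h : spl m rest with
          | nil => exact absurd h (spl_ne_nil m rest)
          | cons a b => simp [List.modifyHead]
        · have hpre : (['5'].isPrefixOf (c :: rest)) = false := by
            simp only [List.isPrefixOf, Bool.and_eq_false_iff, beq_eq_false_iff_ne]
            left; exact fun h => h5 h.symm
          rw [PySem.Chars.splitOnMax.go]
          simp only [Nat.succ_ne_zero, hpre, Bool.false_eq_true, if_false]
          rw [ih f (m + 1) (c :: cur) acc (by omega)]
          simp only [spl, h5, reduceIte]
          cases h : spl (m + 1) rest with
          | nil => exact absurd h (spl_ne_nil (m + 1) rest)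
          | cons a b => simp [List.modifyHead, List.reverse_cons]

lemma splitOnMax_eq_spl (s : List Char) (m : Int) (hm : 0 ≤ m) :
    PySem.Chars.splitOnMax s ['5'] m = spl m.toNat s := by
  unfold PySem.Chars.splitOnMax
  rw [if_neg (by omega)]
  rw [go_eq_spl s (s.length + 1) m.toNat [] [] (by omega)]
  cases h : spl m.toNat s with
  | nil => exact absurd h (spl_ne_nil _ _)
  | cons a b => simp [List.modifyHead]

lemma idx5n_lt (l : List Char) : ∀ (m j : Nat), idx5n l m = some j → j < l.length := by
  induction l with
  | nil => intro m j h; simp [idx5n] at h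
  | cons c rest ih =>
    intro m j h
    cases m with
    | zero =>
      by_cases h5 : c = '5'
      · simp only [idx5n, h5, reduceIte, Option.some_inj] at h
        simp only [List.length_cons]; omega
      · simp only [idx5n, h5, reduceIte, Option.map_eq_some_iff] at h
        obtain ⟨j', hj', rfl⟩ := h
        have := ih 0 j' hj'
        simp only [List.length_cons]; omega
    | succ m =>
      by_cases h5 : c = '5'
      · simp only [idx5n, h5, reduceIte, Option.map_eq_some_iff] at h
        obtain ⟨j', hj', rfl⟩ := h
        have := ih m j' hj'
        simp only [List.length_cons]; omega
      · simp only [idx5n, h5, reduceIte, Option.map_eq_some_iff] at h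
        obtain ⟨j', hj', rfl⟩ := h
        have := ih (m + 1) j' hj'
        simp only [List.length_cons]; omega

-- Relation between the split pieces and the position of the (m+1)-th '5'.
lemma spl_idx (l : List Char) : ∀ (m : Nat),
    (∀ j, idx5n l m = some j →
        (spl (m + 1) l).length = m + 2 ∧ (spl (m + 1) l).getLast? = some (l.drop (j + 1))) ∧
    (idx5n l m = none → (spl (m + 1) l).length ≤ m + 1) := by
  induction l with
  | nil =>
    intro m
    constructor
    · intro j h; simp [idx5n] at h
    · intro _; simp [spl]
  | cons c rest ih =>
    intro m
    by_cases h5 : c = '5'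
    · cases m with
      | zero =>
        constructor
        · intro j h
          simp [idx5n, h5] at h
          subst h
          simp [spl, h5, spl_zero]
        · intro h; simp [idx5n, h5] at h
      | succ m =>
        have hrec := ih m
        constructor
        · intro j h
          simp only [idx5n, h5, reduceIte, Option.map_eq_some_iff] at h
          obtain ⟨j', hj', rfl⟩ := h
          obtain ⟨hlen, hlast⟩ := hrec.1 j' hj'
          constructor
          · simp [spl, h5, hlen]
          · simp only [spl, h5, reduceIte]
            cases hsp : spl (m + 1) rest with
            | nil => exact absurd hsp (spl_ne_nil (m + 1) rest)
            | cons a b =>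
              rw [List.getLast?_cons_cons, ← hsp, hlast]
              simp
        · intro h
          simp only [idx5n, h5, reduceIte, Option.map_eq_none_iff] at h
          have := hrec.2 h
          simp [spl, h5]; omega
    · have hsame : idx5n (c :: rest) m = (idx5n rest m).map Nat.succ := by
        cases m <;> simp [idx5n, h5]
      have hrec := ih m
      have hspl : spl (m + 1) (c :: rest) = (spl (m + 1) rest).modifyHead (List.cons c) := by
        simp [spl, h5]
      constructor
      · intro j h
        rw [hsame, Option.map_eq_some_iff] at h
        obtain ⟨j', hj', rfl⟩ := h
        obtain ⟨hlen, hlast⟩ := hrec.1 j' hj'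
        constructor
        · rw [hspl]; simp [hlen]
        · rw [hspl]
          have h2 : 2 ≤ (spl (m + 1) rest).length := by omega
          cases hsp : spl (m + 1) rest with
          | nil => exact absurd hsp (spl_ne_nil (m + 1) rest)
          | cons a b =>
            cases b with
            | nil => rw [hsp] at h2; simp at h2
            | cons a2 b2 =>
              simp only [List.modifyHead]
              rw [List.getLast?_cons_cons]
              rw [hsp, List.getLast?_cons_cons] at hlast
              rw [hlast]
              simp
      · intro h
        rw [hsame, Option.map_eq_none_iff] at h
        have := hrec.2 h
        rw [hspl]; simp; omega

-- once the counter has passed k + 1 the loop can never return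
lemma loopA_of_gt (s : List Char) (k : Int) : ∀ (i : Nat) (t : Int),
    k + 1 < t → ktlLoopA s k i t = none := by
  intro i
  induction hfuel : s.length - i using Nat.strong_induction_on generalizing i with
  | _ fuel ih =>
    intro t ht
    unfold ktlLoopA
    split
    · next h =>
      by_cases h5 : s[i] = '5'
      · rw [if_pos h5, if_neg (by omega)]
        exact ih (s.length - (i + 1)) (by omega) (i + 1) rfl _ (by omega)
      · rw [if_neg h5, if_neg (by omega)]
        exact ih (s.length - (i + 1)) (by omega) (i + 1) rfl _ (by omega)
    · rfl

-- loop invariant: with t fives already counted (t ≤ k), the loop returns at the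
-- (k - t)-th remaining '5' at an index ≥ i, if there is one
lemma loopA_eq_idx5 (s : List Char) (k : Int) : ∀ (i : Nat) (t : Int),
    i ≤ s.length → t ≤ k →
    ktlLoopA s k i t = (idx5n (s.drop i) (k - t).toNat).map
      (fun j => String.mk (s.take (i + j) ++ '6' :: List.replicate (s.length - (i + j) - 1) '0')) := by
  intro i
  induction hfuel : s.length - i using Nat.strong_induction_on generalizing i with
  | _ fuel ih =>
    intro t hi ht
    unfold ktlLoopA
    split
    · next h =>
      have hdrop : s.drop i = s[i] :: s.drop (i + 1) := List.drop_eq_getElem_cons h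
      by_cases h5 : s[i] = '5'
      · rw [if_pos h5]
        by_cases hk : t = k
        · rw [if_pos (by omega : t + 1 = k + 1), hdrop]
          rw [show (k - t).toNat = 0 from by omega]
          simp [idx5n, h5]
        · rw [if_neg (by omega : ¬ t + 1 = k + 1)]
          rw [ih (s.length - (i + 1)) (by omega) (i + 1) rfl (t + 1) (by omega) (by omega)]
          rw [hdrop, show (k - t).toNat = (k - (t + 1)).toNat + 1 from by omega]
          simp only [idx5n, h5, reduceIte, Option.map_map]
          apply congrArg (fun f => Option.map f _)
          funext j
          have h1 : i + Nat.succ j = (i + 1) + j := by omega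
          simp only [Function.comp, h1]
      · rw [if_neg h5, if_neg (by omega : ¬ t = k + 1)]
        rw [ih (s.length - (i + 1)) (by omega) (i + 1) rfl t (by omega) ht]
        rw [hdrop]
        have hstep : idx5n (s[i] :: s.drop (i + 1)) (k - t).toNat
            = (idx5n (s.drop (i + 1)) (k - t).toNat).map Nat.succ := by
          cases (k - t).toNat <;> simp [idx5n, h5]
        rw [hstep]
        simp only [Option.map_map]
        apply congrArg (fun f => Option.map f _)
        funext j
        have h1 : i + Nat.succ j = (i + 1) + j := by omega
        simp only [Function.comp, h1]
    · next h =>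
      have hnil : s.drop i = [] := List.drop_eq_nil_of_le (by omega)
      cases (k - t).toNat <;> simp [hnil, idx5n]

lemma toChars_ne_nil (n : Int) : PySem.Int.toChars n ≠ [] := by
  unfold PySem.Int.toChars
  split
  · simp
  · have := @Nat.length_toDigits_pos 10 n.toNat
    intro h; rw [h] at this; simp at this

lemma ktl_eq_alt (n k t : Int) (hD : ¬ D_ktl n k t) : ktl n k t = ktl_alt n k t := by
  unfold ktl ktl_alt
  set s := (PySem.Int.toStr n).toList with hs
  by_cases hk0 : 0 ≤ k
  · -- k ≥ 0: relate both sides to idx5n s k.toNat through spl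
    rw [if_neg (by omega)]
    have hA : ktlLoopA s k 0 0 = (idx5n s k.toNat).map
        (fun j => String.mk (s.take j ++ '6' :: List.replicate (s.length - j - 1) '0')) := by
      rw [loopA_eq_idx5 s k 0 0 (by omega) (by omega), List.drop_zero,
        show (k - 0).toNat = k.toNat from by omega]
      apply congrArg (fun f => Option.map f _)
      funext j; simp
    have hparts : PySem.Chars.splitOnMax s ['5'] (k + 1) = spl (k.toNat + 1) s := by
      rw [splitOnMax_eq_spl s (k + 1) (by omega), show (k + 1).toNat = k.toNat + 1 from by omega]
    rw [hparts, hA]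
    cases hidx : idx5n s k.toNat with
    | none =>
      have hlen := (spl_idx s k.toNat).2 hidx
      rw [if_neg (by push_cast; omega)]
      simp
    | some j =>
      obtain ⟨hlen, hlast⟩ := (spl_idx s k.toNat).1 j hidx
      have hjlt := idx5n_lt s k.toNat j hidx
      rw [if_pos (by push_cast; omega)]
      have hget : PySem.List.pyGet? (spl (k.toNat + 1) s) (-1)
          = (spl (k.toNat + 1) s).getLast? := by
        simp only [PySem.List.pyGet?, PySem.List.pyIdx?, hlen]
        rw [if_neg (by omega), if_pos (by push_cast; omega)]
        have h1 : k.toNat + 2 - (-(-1 : Int)).toNat = k.toNat + 1 := by omega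
        rw [h1, List.getLast?_eq_getElem?, hlen]
        simp
      rw [hget, hlast]
      simp only [Option.map_some]
      have hlastlen : (s.drop (j + 1)).length = s.length - j - 1 := by
        simp only [List.length_drop]; omega
      rw [hlastlen]
      have hi : ((s.length : Int) - ((s.length - j - 1 : Nat) : Int) - 1) = (j : Int) := by
        push_cast [Nat.cast_sub (by omega : j + 1 ≤ s.length)]
        omega
      rw [hi, PySem.List.slice_to s (by omega : (0:Int) ≤ (j:Int)), Int.toNat_natCast]
  · -- k < 0: B's guard fires; A's loop never returns
    rw [if_pos (by omega)]
    by_cases hm1 : k = -1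
    · -- ¬D_ktl gives: str(n) starts with '5'
      have hsw : PySem.Str.startswith (PySem.Int.toStr n) "5" = true := by
        rcases Bool.eq_false_or_eq_true (PySem.Str.startswith (PySem.Int.toStr n) "5") with hb | hb
        · exact hb
        · exact absurd ⟨hm1, hb⟩ hD
      rw [PySem.Str.startswith_eq, PySem.Chars.startswith_iff] at hsw
      obtain ⟨rest, hrest⟩ := hsw
      have hsrest : s = '5' :: rest := by rw [hs, ← hrest]; rfl
      rw [ktlLoopA]
      have hlen : 0 < s.length := by rw [hsrest]; simp
      rw [dif_pos hlen]
      have h0 : s[0] = '5' := by simp [hsrest]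
      rw [if_pos h0, if_neg (by omega)]
      exact loopA_of_gt s k 1 1 (by omega)
    · exact loopA_of_gt s k 0 0 (by omega)

-- ===== VERDICT (by name: the statement is the Claim_ definition above) =====
theorem ktl_spec : Claim_unchanged_ktl := by
  intro n k t _ hD
  exact ktl_eq_alt n k t hD

theorem ktl_changed : Claim_changed_ktl := by
  unfold Claim_changed_ktl
  refine ⟨by decide, by decide, ?_, by decide, by decide⟩
  show ktl 1 (-1) 0 = some "6"
  rw [ktl, ktlLoopA]
  decide

theorem ktl_tight : Claim_exact_ktl := by
  intro n k t _ hD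
  obtain ⟨hk, hsw⟩ := hD
  have hB : ktl_alt n k t = none := by
    unfold ktl_alt
    rw [if_pos (by omega)]
  rw [hB]
  unfold ktl
  set s := (PySem.Int.toStr n).toList with hs
  have hne : s ≠ [] := by rw [hs, PySem.Int.toList_toStr]; exact toChars_ne_nil n
  have hlen : 0 < s.length := List.length_pos_iff.mpr hne
  rw [PySem.Str.startswith_eq] at hsw
  -- the first character is not '5', so the t == k+1 check fires at i = 0 and A returns some _
  have h0 : s[0] ≠ '5' := by
    intro h5
    have hpre : ('5' : Char) :: s.drop 1 = s := by
      rw [← h5]; simpa using List.getElem_cons_drop (show 0 < s.length from hlen)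
    have : PySem.Chars.startswith (PySem.Int.toStr n).toList "5".toList = true := by
      rw [PySem.Chars.startswith_iff]
      exact ⟨s.drop 1, by
        simpa using hpre.trans (by rw [hs, PySem.Int.toList_toStr])⟩
    rw [this] at hsw; simp at hsw
  rw [ktlLoopA, dif_pos hlen, if_neg h0, if_pos (by omega)]
  simp
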